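-- pv_equiv track=rewrite | github.com/akhalayly/GoldenBoy | scores_Files/helperFunctions.py | roleTraitIndexesFinder
-- ===== SOURCE A (Python) =====
-- def roleTraitIndexesFinder(Role, DatasetColumns, year):
--     wantedIndexes = []
--     for Attribute in Role:
--         for DatasetColumnIndex in range(len(DatasetColumns)):
--             if removeSpace(Attribute + year).lower() in removeSpace(DatasetColumns[DatasetColumnIndex].lower()) and \
--                     DatasetColumnIndex not in wantedIndexes:
--                 wantedIndexes.append(DatasetColumnIndex)
--     return wantedIndexes
--
-- def removeSpace(trait):
--     newTrait = trait.replace(" ", "")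
--     return newTrait
-- ===== SOURCE B (Python) =====
-- def removeSpace(trait):
--     return trait.replace(" ", "")
--
-- def roleTraitIndexesFinder(Role, DatasetColumns, year):
--     # Column-major bucket pass: each column is assigned to the FIRST attribute whose
--     # cleaned needle it contains; concatenating the per-attribute buckets reproduces
--     # A's order with no dedup test at all.
--     needles = [removeSpace(a + year).lower() for a in Role]
--     buckets = [[] for _ in needles]
--     for i, col in enumerate(DatasetColumns):
--         h = removeSpace(col.lower())
--         for j, n in enumerate(needles):
--             if n in h:
--                 buckets[j].append(i)
--                 break
--     return [i for b in buckets for i in b]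
-- ===== Notes on version B (the rewrite author's own statement) =====
-- stated objective: faster
-- what changed: A scans attribute-major and appends an index after an O(k) list-membership dedup test on every attribute-column pair; B makes a single column-major pass assigning each column index to the bucket of the FIRST attribute whose cleaned needle it contains (inner loop breaks at the first hit) and concatenates the buckets - no dedup test exists because each index is placed at most once.
import Mathlib
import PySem

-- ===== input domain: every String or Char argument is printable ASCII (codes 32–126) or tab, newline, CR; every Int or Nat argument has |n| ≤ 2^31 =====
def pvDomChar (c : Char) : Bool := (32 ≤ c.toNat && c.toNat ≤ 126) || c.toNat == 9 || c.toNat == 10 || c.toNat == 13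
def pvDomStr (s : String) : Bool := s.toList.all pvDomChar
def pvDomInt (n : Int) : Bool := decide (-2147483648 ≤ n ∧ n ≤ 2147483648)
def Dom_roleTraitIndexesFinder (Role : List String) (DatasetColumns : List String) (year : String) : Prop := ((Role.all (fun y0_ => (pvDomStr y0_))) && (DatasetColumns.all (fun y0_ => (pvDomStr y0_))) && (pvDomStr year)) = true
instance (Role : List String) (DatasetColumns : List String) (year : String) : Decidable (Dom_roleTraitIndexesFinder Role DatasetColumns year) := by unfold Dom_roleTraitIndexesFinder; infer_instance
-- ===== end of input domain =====

-- B replaces A's attribute-major scan with its dedup membership test by a single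
-- column-major pass: each column index goes into the bucket of the FIRST matching
-- attribute (inner loop breaks), and the buckets are concatenated, removing A's per-pair
-- list-membership dedup scan (objective: faster; measured faster in a timing run).

-- ===== PORT A =====
def removeSpaceA (trait : String) : String := PySem.Str.replace trait " " ""

def roleTraitIndexesFinder (Role : List String) (DatasetColumns : List String) (year : String) : List Int :=
  Role.foldl (fun wantedIndexes Attribute =>
    (PySem.List.pyRange 0 (DatasetColumns.length : Int) 1).foldl (fun w i =>
      if PySem.Str.isIn (PySem.Str.lower (removeSpaceA (Attribute ++ year)))
           (removeSpaceA (PySem.Str.lower (PySem.List.pyGetD DatasetColumns i "")))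
         && !(w.contains i)
      then w ++ [i] else w) wantedIndexes) []

-- ===== PORT B =====
def removeSpaceB (trait : String) : String := PySem.Str.replace trait " " ""

def roleTraitIndexesFinder_alt (Role : List String) (DatasetColumns : List String) (year : String) : List Int :=
  let needles := Role.map (fun a => PySem.Str.lower (removeSpaceB (a ++ year)))
  let buckets0 : List (List Int) := needles.map (fun _ => ([] : List Int))
  let buckets := (PySem.List.enumerate DatasetColumns 0).foldl (fun B p =>
      let h := removeSpaceB (PySem.Str.lower p.2)
      match (PySem.List.enumerate needles 0).find? (fun q => PySem.Str.isIn q.2 h) with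
      | some q => B.modify q.1.toNat (fun b => b ++ [p.1])
      | none => B) buckets0
  buckets.flatten

-- ===== PRECONDITION & SPEC =====
def Spec_roleTraitIndexesFinder (Role : List String) (DatasetColumns : List String) (year : String) (out : List Int) : Prop := out = roleTraitIndexesFinder_alt Role DatasetColumns year
instance (Role : List String) (DatasetColumns : List String) (year : String) (out : List Int) : Decidable (Spec_roleTraitIndexesFinder Role DatasetColumns year out) := by unfold Spec_roleTraitIndexesFinder; infer_instance

-- ===== CLAIM (what is proved, stated in full; the proofs are below) =====
def Claim_equal_roleTraitIndexesFinder : Prop := ∀ (Role : List String) (DatasetColumns : List String) (year : String), Dom_roleTraitIndexesFinder Role DatasetColumns year → Spec_roleTraitIndexesFinder Role DatasetColumns year (roleTraitIndexesFinder Role DatasetColumns year)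

-- ===== LEMMAS AND PROOFS =====

-- clean a haystack column
def pvHay (c : String) : String := removeSpaceB (PySem.Str.lower c)

-- first-match position of a haystack among the needles
def pvFM (N : List String) (h : String) : Option Nat :=
  N.findIdx? (fun nd => PySem.Str.isIn nd h)

-- the canonical form both ports are reduced to: for each needle position j, in order,
-- the column indices whose first matching needle sits at position j
def pvC (Role : List String) (DC : List String) (year : String) : List Int :=
  (List.range Role.length).flatMap (fun j =>
    (PySem.List.pyRange 0 (DC.length : Int) 1).filter (fun i =>
      pvFM (Role.map (fun a => PySem.Str.lower (removeSpaceB (a ++ year)))) (pvHay (PySem.List.pyGetD DC i "")) == some j))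

-- "append if new" accumulator: the shape A's loops reduce to
def pvAddNew (acc : List Int) (l : List Int) : List Int :=
  l.foldl (fun w i => if w.contains i then w else w ++ [i]) acc

theorem pvAddNew_append (acc : List Int) (l₁ l₂ : List Int) :
    pvAddNew acc (l₁ ++ l₂) = pvAddNew (pvAddNew acc l₁) l₂ := by
  simp [pvAddNew, List.foldl_append]

-- A's inner loop = pvAddNew over the filtered index list
theorem pvInnerA (q : Int → Bool) (l : List Int) : ∀ acc : List Int,
    l.foldl (fun w i => if q i && !(w.contains i) then w ++ [i] else w) acc
      = pvAddNew acc (l.filter q) := by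
  induction l with
  | nil => intro acc; rfl
  | cons x xs ih =>
    intro acc
    cases hq : q x
    · simpa [hq] using ih acc
    · cases hw : acc.contains x <;> simp [pvAddNew, hq] at * <;> exact ih _

-- A's outer loop accumulates pvAddNew over the concatenation
theorem pvFoldA (F : String → List Int) (Role : List String) : ∀ acc : List Int,
    Role.foldl (fun acc a => pvAddNew acc (F a)) acc = pvAddNew acc (Role.flatMap F) := by
  induction Role with
  | nil => intro acc; rfl
  | cons a r ih => intro acc; simp [List.flatMap_cons, pvAddNew_append, ih]

-- on a duplicate-free list, pvAddNew appends exactly the not-yet-seen elements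
theorem pvAddNew_nodup : ∀ (l : List Int), l.Nodup → ∀ acc : List Int,
    pvAddNew acc l = acc ++ l.filter (fun i => !(acc.contains i)) := by
  intro l
  induction l with
  | nil => intro _ acc; simp [pvAddNew]
  | cons x xs ih =>
    intro hnd acc
    have hx : x ∉ xs := (List.nodup_cons.mp hnd).1
    have hxs : xs.Nodup := (List.nodup_cons.mp hnd).2
    by_cases hc : x ∈ acc
    · have h1 : pvAddNew acc (x :: xs) = pvAddNew acc xs := by
        simp [pvAddNew, hc]
      rw [h1, ih hxs, List.filter_cons_of_neg (by simp [hc])]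
    · have h1 : pvAddNew acc (x :: xs) = pvAddNew (acc ++ [x]) xs := by
        simp [pvAddNew, hc]
      rw [h1, ih hxs]
      have hfc : xs.filter (fun i => !((acc ++ [x]).contains i))
          = xs.filter (fun i => !(acc.contains i)) := by
        apply List.filter_congr
        intro i hi
        have hne : i ≠ x := fun h => hx (h ▸ hi)
        simp [List.mem_append, hne]
      rw [hfc, List.filter_cons_of_pos (by simp [hc])]
      simp [List.append_assoc]

-- CORE (A side): interleaved check-then-append over needle blocks = concatenation,
-- over positions j, of the indices whose FIRST matching needle sits at position j
-- (stated for an arbitrary match predicate P)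
theorem pvL (Idxs : List Int) (P : String → Int → Bool) (hnd : Idxs.Nodup) :
    ∀ (N : List String) (acc : List Int),
    pvAddNew acc (N.flatMap (fun nd => Idxs.filter (fun i => P nd i))) =
    acc ++ (List.range N.length).flatMap (fun j =>
      Idxs.filter (fun i => (N.findIdx? (fun nd => P nd i) == some j) && !(acc.contains i))) := by
  intro N
  induction N with
  | nil => intro acc; simp [pvAddNew]
  | cons nd N' ih =>
    intro acc
    rw [List.flatMap_cons, pvAddNew_append,
        pvAddNew_nodup _ (hnd.filter _) acc, List.filter_filter]
    rw [ih]
    rw [List.length_cons, List.range_succ_eq_map, List.flatMap_cons, List.flatMap_map,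
        List.append_assoc]
    congr 1
    have hblock : Idxs.filter (fun i => ((nd :: N').findIdx? (fun nd => P nd i) == some 0) && !(acc.contains i))
        = Idxs.filter (fun i => !(acc.contains i) && P nd i) := by
      apply List.filter_congr
      intro i _
      cases hq : P nd i <;>
        simp only [List.findIdx?_cons, hq, Bool.false_eq_true, not_false_iff,
          if_true, if_false] <;>
      · cases h' : List.findIdx? (fun nd => P nd i) N' <;>
          cases hc : acc.contains i <;> simp [h', hc]
    rw [hblock]
    congr 1
    congr 1
    funext j
    apply List.filter_congr
    intro i hi
    have hacc1 : ((acc ++ Idxs.filter (fun i => !(acc.contains i) && P nd i)).contains i)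
        = (acc.contains i || P nd i) := by
      by_cases hc : i ∈ acc
      · simp [List.mem_append, hc]
      · cases hq : P nd i
        · have hni : i ∉ Idxs.filter (fun i => !(acc.contains i) && P nd i) := by
            intro hm
            have hb := (List.mem_filter.mp hm).2
            simp [hq] at hb
          simp [List.mem_append, hc, hni, hq]
        · have hyi : i ∈ Idxs.filter (fun i => !(acc.contains i) && P nd i) :=
            List.mem_filter.mpr ⟨hi, by simp [hc, hq]⟩
          simp [List.mem_append, hc, hyi, hq, hi]
    rw [hacc1]
    cases hq : P nd i <;>
      simp only [List.findIdx?_cons, hq, Bool.false_eq_true, not_false_iff,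
        if_true, if_false] <;>
    · cases h' : List.findIdx? (fun nd => P nd i) N' <;>
        cases hc : acc.contains i <;> simp [h', hc] <;> omega

-- bridge: find? over enumerate = findIdx? (for an arbitrary predicate on the value)
theorem pvFindEnum (p : String → Bool) : ∀ (N : List String) (s : Int),
    (PySem.List.enumerate N s).find? (fun q => p q.2)
      = (N.findIdx? p).map (fun k : Nat => (s + (k : Int), N.getD k "")) := by
  intro N
  induction N with
  | nil => intro s; simp [PySem.List.enumerate_nil]
  | cons x N' ih =>
    intro s
    rw [PySem.List.enumerate_cons]
    cases hq : p x
    · rw [List.find?_cons_of_neg (by simp [hq]), ih (s + 1)]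
      simp only [List.findIdx?_cons, hq, Bool.false_eq_true, not_false_iff, if_false]
      cases h' : List.findIdx? p N' <;> simp [h'] <;> omega
    · rw [List.find?_cons_of_pos (by simp [hq])]
      simp [List.findIdx?_cons, hq]

-- B's fold step, expressed through the first-match position
def pvStep (N : List String) (B : List (List Int)) (p : Int × String) : List (List Int) :=
  match pvFM N (pvHay p.2) with
  | some k => B.modify k (fun b => b ++ [p.1])
  | none => B

theorem pvStep_eq (N : List String) :
    (fun (B : List (List Int)) (p : Int × String) =>
      match (PySem.List.enumerate N 0).find? (fun q => PySem.Str.isIn q.2 (removeSpaceB (PySem.Str.lower p.2))) with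
      | some q => B.modify q.1.toNat (fun b => b ++ [p.1])
      | none => B) = pvStep N := by
  funext B p
  rw [pvFindEnum (fun nd => PySem.Str.isIn nd (removeSpaceB (PySem.Str.lower p.2))) N 0]
  unfold pvStep pvHay pvFM
  cases List.findIdx? (fun nd => PySem.Str.isIn nd (removeSpaceB (PySem.Str.lower p.2))) N <;> simp

theorem pvStep_length (N : List String) (B : List (List Int)) (p : Int × String) :
    (pvStep N B p).length = B.length := by
  unfold pvStep; cases pvFM N (pvHay p.2) <;> simp

-- a list is the range-map of its getD values
theorem pvMapRangeGetD {α : Type} (d : α) (l : List α) :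
    (List.range l.length).map (fun j => l.getD j d) = l := by
  apply List.ext_getElem (by simp)
  intro i h1 h2
  simp [List.getD_eq_getElem?_getD, List.getElem?_eq_getElem h2]

-- CORE (B side): the bucket fold builds, per position j, the matched indices in pass order
theorem pvBuckets (N : List String) : ∀ (ps : List (Int × String)) (B0 : List (List Int)),
    ps.foldl (pvStep N) B0 =
    (List.range B0.length).map (fun j =>
      B0.getD j [] ++ (ps.filter (fun p => pvFM N (pvHay p.2) == some j)).map (fun p => p.1)) := by
  intro ps
  induction ps with
  | nil =>
    intro B0
    simpa using (pvMapRangeGetD [] B0).symm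
  | cons p ps ih =>
    intro B0
    rw [List.foldl_cons, ih (pvStep N B0 p), pvStep_length]
    apply List.map_congr_left
    intro j hj
    have hjlt : j < B0.length := List.mem_range.mp hj
    cases hk : pvFM N (pvHay p.2) with
    | none =>
      simp [pvStep, hk]
    | some k =>
      have hstep : (pvStep N B0 p).getD j [] =
          if k = j then B0.getD j [] ++ [p.1] else B0.getD j [] := by
        unfold pvStep
        rw [hk]
        simp only [List.getD_eq_getElem?_getD, List.getElem?_modify]
        rw [List.getElem?_eq_getElem hjlt]
        split_ifs <;> simp
      by_cases hkj : k = j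
      · subst hkj
        rw [hstep, if_pos rfl]
        simp [hk, List.append_assoc]
      · rw [hstep, if_neg hkj]
        have hne : (some k == some j) = false := by simp [hkj]
        simp [hk, hne]

-- the initial buckets read back as []
theorem pvGetDNil (N : List String) (j : Nat) :
    (N.map (fun _ => ([] : List Int))).getD j [] = [] := by
  rw [List.getD_eq_getElem?_getD, List.getElem?_map]
  cases h : N[j]? <;> simp

-- per-bucket conversion: filtering enumerate pairs = filtering the index range
theorem pvPerBucket (N : List String) (DC : List String) (j : Nat) :
    ((PySem.List.enumerate DC 0).filter (fun p => pvFM N (pvHay p.2) == some j)).map (fun p => p.1)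
    = (PySem.List.pyRange 0 (DC.length : Int) 1).filter
        (fun i => pvFM N (pvHay (PySem.List.pyGetD DC i "")) == some j) := by
  rw [show PySem.List.enumerate DC 0 = PySem.List.enumerate DC from rfl,
      PySem.List.enumerate_eq_map_pyRange DC ""]
  rw [List.filter_map, List.map_map]
  simp [Function.comp_def, PySem.List.len]

-- A reduces to the canonical form
theorem pvA_eq (Role DC : List String) (year : String) :
    roleTraitIndexesFinder Role DC year = pvC Role DC year := by
  unfold roleTraitIndexesFinder
  simp only [show removeSpaceA = removeSpaceB from rfl]
  simp only [pvInnerA, pvFoldA]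
  have hL := pvL (PySem.List.pyRange 0 (DC.length : Int) 1)
    (fun nd i => PySem.Str.isIn nd (removeSpaceB (PySem.Str.lower (PySem.List.pyGetD DC i ""))))
    (PySem.List.nodup_pyRange_one 0 (DC.length : Int))
    (Role.map (fun a => PySem.Str.lower (removeSpaceB (a ++ year)))) []
  rw [List.flatMap_map] at hL
  rw [hL]
  unfold pvC pvFM pvHay
  simp

-- B reduces to the canonical form
theorem pvB_eq (Role DC : List String) (year : String) :
    roleTraitIndexesFinder_alt Role DC year = pvC Role DC year := by
  show ((PySem.List.enumerate DC 0).foldl (fun B p =>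
      match (PySem.List.enumerate (Role.map (fun a => PySem.Str.lower (removeSpaceB (a ++ year)))) 0).find?
        (fun q => PySem.Str.isIn q.2 (removeSpaceB (PySem.Str.lower p.2))) with
      | some q => B.modify q.1.toNat (fun b => b ++ [p.1])
      | none => B)
      ((Role.map (fun a => PySem.Str.lower (removeSpaceB (a ++ year)))).map (fun _ => ([] : List Int)))).flatten
    = pvC Role DC year
  rw [pvStep_eq]
  rw [pvBuckets]
  simp only [List.length_map, pvGetDNil, List.nil_append]
  rw [← List.flatMap_def]
  unfold pvC
  congr 1
  funext j
  exact pvPerBucket _ DC j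

-- ===== VERDICT (by name: the statement is the Claim_ definition above) =====
theorem roleTraitIndexesFinder_spec : Claim_equal_roleTraitIndexesFinder := by
  intro Role DC year _
  unfold Spec_roleTraitIndexesFinder
  rw [pvA_eq, pvB_eq]
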